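-- pv_equiv track=rewrite | github.com/HaigBishop/micro16s | construct_dataset.py | construct_labels_in_taxon_dict
-- ===== SOURCE A (Python) =====
-- def construct_labels_in_taxon_dict(full_tax_labels):
--     """
--     Collects all taxonomic labels within each taxon at each rank.
--
--     Example output:
--     list_of_taxon_labels_in_taxon_at_rank_dict = {
--         0: {  # rank 0 (domain)
--             'Bacteria': ['Proteobacteria', 'Firmicutes'],  # phyla within Bacteria
--             'Archaea': ['Euryarchaeota']                   # phyla within Archaea
--         },
--         1: {  # rank 1 (phylum)
--             'Proteobacteria': ['Alphaproteobacteria', 'Gammaproteobacteria'],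
--             'Firmicutes': ['Bacilli', 'Clostridia'],
--             'Euryarchaeota': ['Methanobacteria']
--         }
--     }
--
--     Args:
--         full_tax_labels (list): List of full taxonomic classifications of sequences from domain to species
--
--     Returns:
--         dict: Dictionary of taxonomic labels within each taxon at each rank
--     """
--     list_of_taxon_labels_in_taxon_at_rank_dict = {}
--
--     # for each taxonomy path (e.g. ['Bacteria', 'Proteobacteria', 'Alphaproteobacteria', ...])
--     for tax in full_tax_labels:
--         # note: we only go to the penultimate rank because the last level (species) has no child
--         for i in range(len(tax) - 1):
--             parent = tax[i]
--             child = tax[i + 1]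
--             if i not in list_of_taxon_labels_in_taxon_at_rank_dict:
--                 list_of_taxon_labels_in_taxon_at_rank_dict[i] = {}
--             if parent not in list_of_taxon_labels_in_taxon_at_rank_dict[i]:
--                 list_of_taxon_labels_in_taxon_at_rank_dict[i][parent] = []
--             # append the child if it is not already in the list (to avoid duplicates)
--             if child not in list_of_taxon_labels_in_taxon_at_rank_dict[i][parent]:
--                 list_of_taxon_labels_in_taxon_at_rank_dict[i][parent].append(child)
--
--     return list_of_taxon_labels_in_taxon_at_rank_dict
-- ===== SOURCE B (Python) =====
-- def construct_labels_in_taxon_dict(full_tax_labels):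
--     # Rank-major traversal: instead of walking each taxonomy path and updating a
--     # nested dict in place, compute the deepest path length first, then for each
--     # rank level scan all paths once, gathering each parent's children as keys of
--     # an insertion-ordered dict (a dedup set).  Correct because within one path a
--     # rank occurs once, ranks form prefixes 0..len-2 (so rank keys come out
--     # 0,1,2,... exactly as first-encounter order), and parent/child first-occurrence
--     # order per rank is the same in path-major and rank-major scans.
--     max_len = 0
--     for tax in full_tax_labels:
--         if len(tax) > max_len:
--             max_len = len(tax)
--     result = {}
--     for i in range(max_len - 1):
--         parents = {}
--         for tax in full_tax_labels:
--             if i + 1 < len(tax):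
--                 parents.setdefault(tax[i], {})[tax[i + 1]] = None
--         result[i] = {p: list(kids) for p, kids in parents.items()}
--     return result
-- ===== Notes on version B (the rewrite author's own statement) =====
-- stated objective: alternative
-- what changed: Rank-major instead of path-major: B first computes the deepest path length, then for each rank level scans all paths once, collecting each parent's children as keys of an insertion-ordered dict, instead of A's single pass over paths updating a nested dict with an inline membership check.
import Mathlib
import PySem

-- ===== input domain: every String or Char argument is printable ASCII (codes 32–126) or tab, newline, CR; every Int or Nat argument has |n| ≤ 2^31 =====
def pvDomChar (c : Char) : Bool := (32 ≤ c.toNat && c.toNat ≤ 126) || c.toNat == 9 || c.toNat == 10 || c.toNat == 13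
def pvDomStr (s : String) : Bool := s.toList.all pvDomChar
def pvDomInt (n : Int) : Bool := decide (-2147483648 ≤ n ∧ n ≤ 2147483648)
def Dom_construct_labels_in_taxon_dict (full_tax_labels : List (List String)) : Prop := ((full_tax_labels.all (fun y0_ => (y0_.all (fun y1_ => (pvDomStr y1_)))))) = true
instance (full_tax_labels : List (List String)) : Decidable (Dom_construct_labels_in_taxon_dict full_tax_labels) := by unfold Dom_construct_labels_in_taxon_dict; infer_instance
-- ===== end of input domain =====

-- B traverses rank-major (per rank level, one scan of all paths, children as ordered-dict keys)
-- instead of A's path-major pass over a nested dict with an inline membership check; objective: alternative.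

-- ===== PORT A =====
def construct_labels_in_taxon_dict (full_tax_labels : List (List String)) : List (Int × List (String × List String)) :=
  let d := full_tax_labels.foldl (fun d tax =>
    (PySem.List.pyRange 0 ((tax.length : Int) - 1) 1).foldl (fun d i =>
      let parent := PySem.List.pyGetD tax i ""
      let child := PySem.List.pyGetD tax (i + 1) ""
      let d := if d.contains i then d else d.insert i PySem.Dict.empty
      let inner := d.getD i PySem.Dict.empty
      let inner := if inner.contains parent then inner else inner.insert parent []
      let cs := inner.getD parent []
      let cs := if child ∈ cs then cs else cs ++ [child]
      d.insert i (inner.insert parent cs)) d) PySem.Dict.empty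
  d.items.map (fun p => (p.1, p.2.items))

-- ===== PORT B =====
-- max path length (explicit running-max loop of Source B)
def pvMaxLen (full_tax_labels : List (List String)) : Int :=
  full_tax_labels.foldl (fun m tax => if (tax.length : Int) > m then (tax.length : Int) else m) 0

-- one rank level: parents.setdefault(tax[i], {})[tax[i+1]] = None over all paths
def pvRankParents (full_tax_labels : List (List String)) (i : Int) : PySem.Dict String (PySem.Dict String Unit) :=
  full_tax_labels.foldl (fun parents tax =>
    if i + 1 < (tax.length : Int) then
      PySem.Dict.modify parents (PySem.List.pyGetD tax i "") PySem.Dict.empty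
        (fun kids => kids.insert (PySem.List.pyGetD tax (i + 1) "") ())
    else parents) PySem.Dict.empty

def construct_labels_in_taxon_dict_alt (full_tax_labels : List (List String)) : List (Int × List (String × List String)) :=
  (PySem.List.pyRange 0 (pvMaxLen full_tax_labels - 1) 1).map (fun i =>
    (i, (pvRankParents full_tax_labels i).items.map (fun q => (q.1, q.2.keys))))

-- ===== PRECONDITION & SPEC =====
def Spec_construct_labels_in_taxon_dict (full_tax_labels : List (List String)) (out : List (Int × List (String × List String))) : Prop := out = construct_labels_in_taxon_dict_alt full_tax_labels
instance (full_tax_labels : List (List String)) (out : List (Int × List (String × List String))) : Decidable (Spec_construct_labels_in_taxon_dict full_tax_labels out) := by unfold Spec_construct_labels_in_taxon_dict; infer_instance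

-- ===== CLAIM (what is proved, stated in full; the proofs are below) =====
def Claim_equal_construct_labels_in_taxon_dict : Prop := ∀ (full_tax_labels : List (List String)), Dom_construct_labels_in_taxon_dict full_tax_labels → Spec_construct_labels_in_taxon_dict full_tax_labels (construct_labels_in_taxon_dict full_tax_labels)

-- ===== LEMMAS AND PROOFS =====

-- the (rank, parent, child) triples of one path, in A's visiting order
def pvTrips (tax : List String) : List (Int × String × String) :=
  (PySem.List.pyRange 0 ((tax.length : Int) - 1) 1).map
    (fun i => (i, PySem.List.pyGetD tax i "", PySem.List.pyGetD tax (i + 1) ""))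

def pvT (ls : List (List String)) : List (Int × String × String) := ls.flatMap pvTrips

-- A's loop body, collapsed to nested Dict.modify
def pvStep (d : PySem.Dict Int (PySem.Dict String (List String))) (x : Int × String × String) :
    PySem.Dict Int (PySem.Dict String (List String)) :=
  d.modify x.1 PySem.Dict.empty (fun inner =>
    inner.modify x.2.1 [] (fun cs => if x.2.2 ∈ cs then cs else cs ++ [x.2.2]))

-- B's inner-loop step over triples
def pvStepB (parents : PySem.Dict String (PySem.Dict String Unit)) (x : Int × String × String) :
    PySem.Dict String (PySem.Dict String Unit) :=
  parents.modify x.2.1 PySem.Dict.empty (fun kids => kids.insert x.2.2 ())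

-- setdefault-style collapses
theorem pv_collapse_getD {κ ν : Type} [BEq κ] [LawfulBEq κ] (d : PySem.Dict κ ν) (k : κ) (v : ν) :
    (if d.contains k then d else d.insert k v).getD k v = d.getD k v := by
  split
  · rfl
  · rename_i h
    rw [PySem.Dict.getD_insert_self, PySem.Dict.getD_of_not_contains _ _ (by simpa using h)]

theorem pv_collapse_insert {κ ν : Type} [BEq κ] [LawfulBEq κ] (d : PySem.Dict κ ν) (k : κ) (v w : ν) :
    (if d.contains k then d else d.insert k v).insert k w = d.insert k w := by
  split
  · rfl
  · rw [PySem.Dict.insert_insert_self]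

theorem pv_stepA_collapse (d : PySem.Dict Int (PySem.Dict String (List String)))
    (k : Int) (p c : String) :
    (let d' := if d.contains k then d else d.insert k PySem.Dict.empty
     let inner := d'.getD k PySem.Dict.empty
     let inner' := if inner.contains p then inner else inner.insert p []
     let cs := inner'.getD p []
     let cs' := if c ∈ cs then cs else cs ++ [c]
     d'.insert k (inner'.insert p cs')) = pvStep d (k, p, c) := by
  unfold pvStep
  simp only [PySem.Dict.modify, pv_collapse_getD, pv_collapse_insert]

-- A's whole build as a fold of pvStep over all triples
theorem pv_A_eq_fold (ls : List (List String)) :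
    construct_labels_in_taxon_dict ls
      = ((pvT ls).foldl pvStep PySem.Dict.empty).items.map (fun p => (p.1, p.2.items)) := by
  unfold construct_labels_in_taxon_dict pvT
  simp only [List.foldl_flatMap]
  congr 2
  apply PySem.List.foldl_congr_mem
  intro d tax _
  unfold pvTrips
  rw [List.foldl_map]
  apply PySem.List.foldl_congr_mem
  intro acc i _
  exact pv_stepA_collapse acc i _ _

-- lookup in a keyed modify-fold = fold over the matching sublist
theorem pv_getD_foldl_modify {κ ν β : Type} [BEq κ] [LawfulBEq κ] [DecidableEq κ]
    (l : List β) (key : β → κ) (d0 : ν) (f : β → ν → ν) (d : PySem.Dict κ ν) (k : κ) :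
    (l.foldl (fun d x => d.modify (key x) d0 (f x)) d).getD k d0
      = (l.filter (fun x => key x == k)).foldl (fun v x => f x v) (d.getD k d0) := by
  induction l generalizing d with
  | nil => rfl
  | cons x t ih =>
    simp only [List.foldl_cons, List.filter_cons]
    by_cases h : key x = k
    · simp [h, ih]
    · simp [h, ih, PySem.Dict.getD_modify, Ne.symm h]

-- pyRange 0 (n-1) with a possibly-(-1) bound, in Nat form
theorem pv_range_pred (n : Int) (h : 0 ≤ n) :
    PySem.List.pyRange 0 (n - 1) 1 = PySem.List.pyRange 0 ((n.toNat - 1 : Nat) : Int) 1 := by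
  rcases Int.le_iff_lt_or_eq.mp h with h1 | h1
  · congr 1
    omega
  · rw [← h1]
    rfl

-- the triples of one path carrying rank i
theorem pv_filter_trips (tax : List String) (i : Int) (hi : 0 ≤ i) :
    (pvTrips tax).filter (fun x => x.1 == i)
      = if i + 1 < (tax.length : Int) then
          [(i, PySem.List.pyGetD tax i "", PySem.List.pyGetD tax (i + 1) "")]
        else [] := by
  unfold pvTrips
  rw [pv_range_pred _ (by positivity), PySem.List.pyRange_zero_natCast, List.map_map,
    List.filter_map]
  simp only [Function.comp_def]
  rw [show (fun (k : Nat) => (((k : Int), PySem.List.pyGetD tax (k : Int) "",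
        PySem.List.pyGetD tax ((k : Int) + 1) "").1 == i)) = (fun k => k == i.toNat) from
    funext fun k => by
      by_cases hk : (k : Int) = i
      · simp [show k = i.toNat by omega, hi]
      · simp [hk, show k ≠ i.toNat by omega]]
  rw [List.filter_beq]
  by_cases hlt : i + 1 < (tax.length : Int)
  · have hcnt : List.count i.toNat (List.range ((tax.length : Int).toNat - 1)) = 1 := by
      exact List.count_eq_one_of_mem List.nodup_range (by rw [List.mem_range]; omega)
    rw [if_pos hlt, hcnt]
    simp only [List.replicate, List.map_cons, List.map_nil]
    rw [show ((i.toNat : Int)) = i by omega]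
  · have hcnt : List.count i.toNat (List.range ((tax.length : Int).toNat - 1)) = 0 := by
      rw [List.count_eq_zero]
      rw [List.mem_range]
      omega
    rw [if_neg hlt, hcnt]
    rfl

-- B's per-rank gather = fold of pvStepB over the rank-i triples
theorem pv_rankParents_eq (ls : List (List String)) (i : Int) (hi : 0 ≤ i) :
    pvRankParents ls i
      = ((pvT ls).filter (fun x => x.1 == i)).foldl pvStepB PySem.Dict.empty := by
  unfold pvRankParents pvT
  rw [List.filter_flatMap, List.foldl_flatMap]
  apply PySem.List.foldl_congr_mem
  intro acc tax _
  rw [pv_filter_trips tax i hi]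
  split
  · rfl
  · rfl

-- ranks of one path are the range 0..len-2
theorem pv_trips_fst (tax : List String) :
    (pvTrips tax).map (·.1) = PySem.List.pyRange 0 ((tax.length : Int) - 1) 1 := by
  unfold pvTrips
  rw [List.map_map]
  simp [Function.comp_def]

-- merging two initial ranges in a Set
theorem pv_update_range (a b : Nat) :
    PySem.Set.update (PySem.List.pyRange 0 (a : Int) 1) (PySem.List.pyRange 0 (b : Int) 1)
      = PySem.List.pyRange 0 ((max a b : Nat) : Int) 1 := by
  induction b with
  | zero => simp [PySem.Set.update, PySem.List.pyRange]
  | succ n ih =>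
    rw [show ((n + 1 : Nat) : Int) = (n : Int) + 1 by push_cast; ring,
      PySem.List.pyRange_one_succ_right (by positivity)]
    unfold PySem.Set.update at ih ⊢
    rw [List.foldl_append, ih]
    simp only [List.foldl_cons, List.foldl_nil]
    rcases Nat.lt_or_ge n a with hn | hn
    · have hmax : max a n = a := Nat.max_eq_left hn.le
      have hmax1 : max a (n + 1) = a := Nat.max_eq_left hn
      have hmem : (n : Int) ∈ PySem.List.pyRange 0 ((max a n : Nat) : Int) 1 := by
        rw [hmax]
        exact PySem.List.mem_pyRange_one.mpr ⟨by positivity, by exact_mod_cast hn⟩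
      have hadd : PySem.Set.add (PySem.List.pyRange 0 ((max a n : Nat) : Int) 1) (n : Int)
          = PySem.List.pyRange 0 ((max a n : Nat) : Int) 1 := by
        simp only [PySem.Set.add, PySem.Set.contains]
        rw [if_pos]
        simpa using hmem
      rw [hadd, hmax, hmax1]
    · have hmax : max a n = n := Nat.max_eq_right hn
      have hmax1 : max a (n + 1) = n + 1 := Nat.max_eq_right (by omega)
      have hmem : (n : Int) ∉ PySem.List.pyRange 0 ((max a n : Nat) : Int) 1 := by
        rw [hmax]
        intro hc
        have := PySem.List.mem_pyRange_one.mp hc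
        omega
      have hadd : PySem.Set.add (PySem.List.pyRange 0 ((max a n : Nat) : Int) 1) (n : Int)
          = PySem.List.pyRange 0 ((max a n : Nat) : Int) 1 ++ [(n : Int)] := by
        simp only [PySem.Set.add, PySem.Set.contains]
        rw [if_neg]
        simpa using hmem
      rw [hadd, hmax, hmax1,
        show ((n + 1 : Nat) : Int) = (n : Int) + 1 by push_cast; ring,
        PySem.List.pyRange_one_succ_right (by positivity)]

theorem pv_fold_update (ls : List (List String)) (m : Int) (hm : 0 ≤ m) :
    ls.foldl (fun s tax => PySem.Set.update s (PySem.List.pyRange 0 ((tax.length : Int) - 1) 1))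
        (PySem.List.pyRange 0 ((m.toNat - 1 : Nat) : Int) 1)
      = PySem.List.pyRange 0
          (((ls.foldl (fun m tax => if (tax.length : Int) > m then (tax.length : Int) else m) m).toNat
            - 1 : Nat) : Int) 1 := by
  induction ls generalizing m with
  | nil => rfl
  | cons tax t ih =>
    simp only [List.foldl_cons]
    rw [pv_range_pred ((tax.length : Int)) (by positivity), pv_update_range,
      show max (m.toNat - 1) ((tax.length : Int).toNat - 1)
        = (if (tax.length : Int) > m then (tax.length : Int) else m).toNat - 1 by
          rcases Nat.le_total (m.toNat - 1) ((tax.length : Int).toNat - 1) with hh | hh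
          · rw [Nat.max_eq_right hh]; split <;> omega
          · rw [Nat.max_eq_left hh]; split <;> omega]
    exact ih _ (by split <;> omega)

-- the rank keys over all paths form exactly the range 0..max_len-2
theorem pv_keys_range (ls : List (List String)) :
    PySem.Set.ofList ((pvT ls).map (·.1))
      = PySem.List.pyRange 0 (pvMaxLen ls - 1) 1 := by
  unfold pvT pvMaxLen
  rw [List.map_flatMap, PySem.Set.ofList_eq_foldl, List.foldl_flatMap]
  have hbody : ∀ (s : PySem.Set Int) (tax : List String),
      ((pvTrips tax).map (·.1)).foldl PySem.Set.add s
        = PySem.Set.update s (PySem.List.pyRange 0 ((tax.length : Int) - 1) 1) := by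
    intro s tax
    rw [pv_trips_fst]
    rfl
  rw [show (fun (s : PySem.Set Int) tax => ((pvTrips tax).map (·.1)).foldl PySem.Set.add s)
      = fun s tax => PySem.Set.update s (PySem.List.pyRange 0 ((tax.length : Int) - 1) 1) from
    funext fun s => funext fun tax => hbody s tax]
  have h0 : (PySem.Set.empty : PySem.Set Int)
      = PySem.List.pyRange 0 (((0 : Int).toNat - 1 : Nat) : Int) 1 := rfl
  have hnn : 0 ≤ ls.foldl (fun m tax => if (tax.length : Int) > m then (tax.length : Int) else m) 0 := by
    have : ∀ (l : List (List String)) (m : Int), 0 ≤ m →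
        0 ≤ l.foldl (fun m tax => if (tax.length : Int) > m then (tax.length : Int) else m) m := by
      intro l
      induction l with
      | nil => intro m hm; simpa using hm
      | cons x t ih =>
        intro m hm
        simp only [List.foldl_cons]
        exact ih _ (by split <;> omega)
    exact this ls 0 le_rfl
  rw [show ([] : PySem.Set Int) = PySem.List.pyRange 0 (((0 : Int).toNat - 1 : Nat) : Int) 1 from rfl,
    pv_fold_update ls 0 le_rfl, ← pv_range_pred _ hnn]

-- items of A's inner dict at one rank = B's per-rank items with children read off as keys
theorem pv_inner_items (m : List (Int × String × String)) :
    (m.foldl (fun inner x =>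
        inner.modify x.2.1 [] (fun cs => if x.2.2 ∈ cs then cs else cs ++ [x.2.2]))
        PySem.Dict.empty).items
      = (m.foldl pvStepB PySem.Dict.empty).items.map (fun q => (q.1, q.2.keys)) := by
  have hnodA : (m.foldl (fun inner x =>
      inner.modify x.2.1 [] (fun cs => if x.2.2 ∈ cs then cs else cs ++ [x.2.2]))
      PySem.Dict.empty).keys.Nodup :=
    PySem.Dict.nodup_keys_foldl_modify_key m (·.2.1) []
      (fun _ x cs => if x.2.2 ∈ cs then cs else cs ++ [x.2.2]) _
      (by simp)
  have hnodB : (m.foldl pvStepB PySem.Dict.empty).keys.Nodup :=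
    PySem.Dict.nodup_keys_foldl_modify_key m (·.2.1) PySem.Dict.empty
      (fun _ x kids => kids.insert x.2.2 ()) _
      (by simp)
  rw [PySem.Dict.items_eq_map_keys _ hnodA [],
    PySem.Dict.items_eq_map_keys _ hnodB PySem.Dict.empty, List.map_map]
  have hkeys : (m.foldl (fun inner x =>
      inner.modify x.2.1 [] (fun cs => if x.2.2 ∈ cs then cs else cs ++ [x.2.2]))
      PySem.Dict.empty).keys = (m.foldl pvStepB PySem.Dict.empty).keys := by
    have e1 : (m.foldl (fun inner x =>
        inner.modify x.2.1 [] (fun cs => if x.2.2 ∈ cs then cs else cs ++ [x.2.2]))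
        PySem.Dict.empty).keys
          = PySem.Set.update (PySem.Dict.empty : PySem.Dict String (List String)).keys (m.map (·.2.1)) :=
      PySem.Dict.keys_foldl_modify_key m (·.2.1) []
        (fun _ x cs => if x.2.2 ∈ cs then cs else cs ++ [x.2.2]) _
    have e2 : (m.foldl pvStepB PySem.Dict.empty).keys
          = PySem.Set.update (PySem.Dict.empty : PySem.Dict String (PySem.Dict String Unit)).keys (m.map (·.2.1)) :=
      PySem.Dict.keys_foldl_modify_key m (·.2.1) PySem.Dict.empty
        (fun _ x kids => kids.insert x.2.2 ()) _
    rw [e1, e2]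
    simp [PySem.Dict.keys_empty]
  rw [hkeys]
  apply List.map_congr_left
  intro p _
  simp only [Function.comp_def]
  congr 1
  have gA : (m.foldl (fun inner x =>
      inner.modify x.2.1 [] (fun cs => if x.2.2 ∈ cs then cs else cs ++ [x.2.2]))
      PySem.Dict.empty).getD p []
        = (m.filter (fun x => x.2.1 == p)).foldl
            (fun v x => if x.2.2 ∈ v then v else v ++ [x.2.2])
            ((PySem.Dict.empty : PySem.Dict String (List String)).getD p []) :=
    pv_getD_foldl_modify m (·.2.1) []
      (fun x cs => if x.2.2 ∈ cs then cs else cs ++ [x.2.2]) PySem.Dict.empty p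
  have gB : (m.foldl pvStepB PySem.Dict.empty).getD p PySem.Dict.empty
        = (m.filter (fun x => x.2.1 == p)).foldl
            (fun v x => v.insert x.2.2 ())
            ((PySem.Dict.empty : PySem.Dict String (PySem.Dict String Unit)).getD p PySem.Dict.empty) :=
    pv_getD_foldl_modify m (·.2.1) PySem.Dict.empty
      (fun x kids => kids.insert x.2.2 ()) PySem.Dict.empty p
  rw [gA, gB, PySem.Dict.getD_empty, PySem.Dict.getD_empty]
  have hk : ((m.filter (fun x => x.2.1 == p)).foldl
        (fun v x => v.insert x.2.2 ()) (PySem.Dict.empty : PySem.Dict String Unit)).keys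
      = PySem.Set.update (PySem.Dict.empty : PySem.Dict String Unit).keys
          ((m.filter (fun x => x.2.1 == p)).map (·.2.2)) :=
    PySem.Dict.keys_foldl_insert_key (m.filter (fun x => x.2.1 == p))
      (fun x : Int × String × String => x.2.2) (fun _ _ => ()) PySem.Dict.empty
  rw [hk]
  have hstep : ∀ (v : List String) (x : Int × String × String),
      (if x.2.2 ∈ v then v else v ++ [x.2.2]) = PySem.Set.add v x.2.2 := by
    intro v x
    simp [PySem.Set.add, PySem.Set.contains]
  have hcongr : (m.filter (fun x => x.2.1 == p)).foldl
        (fun v x => if x.2.2 ∈ v then v else v ++ [x.2.2]) []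
      = (m.filter (fun x => x.2.1 == p)).foldl (fun v x => PySem.Set.add v x.2.2) [] := by
    apply PySem.List.foldl_congr_mem
    intro v x _
    exact hstep v x
  rw [hcongr]
  exact (List.foldl_map (f := fun x : Int × String × String => x.2.2)
    (g := PySem.Set.add) (l := m.filter (fun x => x.2.1 == p)) (init := [])).symm

-- ===== VERDICT (by name: the statement is the Claim_ definition above) =====
theorem construct_labels_in_taxon_dict_spec : Claim_equal_construct_labels_in_taxon_dict := by
  intro ls _
  show construct_labels_in_taxon_dict ls = construct_labels_in_taxon_dict_alt ls
  rw [pv_A_eq_fold]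
  unfold construct_labels_in_taxon_dict_alt
  have hnod : ((pvT ls).foldl pvStep PySem.Dict.empty).keys.Nodup :=
    PySem.Dict.nodup_keys_foldl_modify_key (pvT ls) (·.1) PySem.Dict.empty
      (fun _ x inner => inner.modify x.2.1 [] (fun cs => if x.2.2 ∈ cs then cs else cs ++ [x.2.2])) _
      (by simp)
  rw [PySem.Dict.items_eq_map_keys _ hnod PySem.Dict.empty, List.map_map]
  have hkeys : ((pvT ls).foldl pvStep PySem.Dict.empty).keys
      = PySem.List.pyRange 0 (pvMaxLen ls - 1) 1 := by
    have e : ((pvT ls).foldl pvStep PySem.Dict.empty).keys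
        = PySem.Set.update (PySem.Dict.empty : PySem.Dict Int (PySem.Dict String (List String))).keys
            ((pvT ls).map (·.1)) :=
      PySem.Dict.keys_foldl_modify_key (pvT ls) (·.1) PySem.Dict.empty
        (fun _ x inner => inner.modify x.2.1 [] (fun cs => if x.2.2 ∈ cs then cs else cs ++ [x.2.2])) _
    rw [e]
    exact pv_keys_range ls
  rw [hkeys]
  apply List.map_congr_left
  intro i hi
  have hi0 : 0 ≤ i := (PySem.List.mem_pyRange_one.mp hi).1
  simp only [Function.comp_def]
  congr 1
  have gD : ((pvT ls).foldl pvStep PySem.Dict.empty).getD i PySem.Dict.empty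
      = ((pvT ls).filter (fun x => x.1 == i)).foldl
          (fun inner x => inner.modify x.2.1 [] (fun cs => if x.2.2 ∈ cs then cs else cs ++ [x.2.2]))
          ((PySem.Dict.empty : PySem.Dict Int (PySem.Dict String (List String))).getD i PySem.Dict.empty) :=
    pv_getD_foldl_modify (pvT ls) (·.1) PySem.Dict.empty
      (fun x inner => inner.modify x.2.1 [] (fun cs => if x.2.2 ∈ cs then cs else cs ++ [x.2.2]))
      PySem.Dict.empty i
  rw [gD, PySem.Dict.getD_empty, pv_inner_items, pv_rankParents_eq ls i hi0]
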